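-- pv_equiv track=rewrite | github.com/ScienceOne-AI/S1-MatAgent | toolkits/hea/genetic_algorithm.py | find_combinations
-- ===== SOURCE A (Python) =====
-- import math
--
-- def find_combinations(n):
--     s = n - 5
--     if s < 0:
--         return []
--
--     combinations = []
--     min_atoms = max(1, math.ceil(0.05 * n))  # 每个元素最少原子数（至少5%，但不少于1个原子）
--     max_atoms = int(0.35 * n)  # 每个元素最多原子数（不超过35%）
--
--     def dfs(remaining, path):
--         if len(path) == 4:
--             # 检查最后一个元素是否在范围内
--             last_element = remaining + 1  # +1是因为后面会对所有元素+1
--             if min_atoms <= last_element <= max_atoms: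
--                 combo = path + (remaining,)
--                 t = tuple(x + 1 for x in combo)
--                 if t[0] >= t[1] and t[0] >= t[2] and t[0] >= t[3] and t[0] >= t[4]:
--                     combinations.append(t)
--             return
--
--         # 遍历可能的原子数
--         for i in range(max(0, min_atoms - 1), min(remaining + 1, max_atoms)):
--             # i+1将是实际原子数（因为后面会对所有元素+1）
--             if i + 1 >= min_atoms and i + 1 <= max_atoms:
--                 dfs(remaining - i, path + (i,))
--
--     dfs(s, ())
--     return combinations
-- ===== SOURCE B (Python) =====
-- import math
--
-- def find_combinations(n):
--     s = n - 5
--     if s < 0: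
--         return []
--     min_atoms = max(1, math.ceil(0.05 * n))
--     max_atoms = int(0.35 * n)
--     combinations = []
--     for a1 in range(min_atoms, max_atoms + 1):
--         for a2 in range(min_atoms, max_atoms + 1):
--             for a3 in range(min_atoms, max_atoms + 1):
--                 for a4 in range(min_atoms, max_atoms + 1):
--                     a5 = n - a1 - a2 - a3 - a4
--                     if min_atoms <= a5 <= max_atoms and a1 >= a2 and a1 >= a3 and a1 >= a4 and a1 >= a5:
--                         combinations.append((a1, a2, a3, a4, a5))
--     return combinations
-- ===== Notes on version B (the rewrite author's own statement) =====
-- stated objective: simpler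
-- what changed: A's recursive dfs with a closure, tuple-growing path and per-level range pruning is replaced by four flat nested loops over the full [min_atoms, max_atoms] range with the fifth component computed arithmetically and filtered; same tuples in the same lexicographic order.
import Mathlib
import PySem

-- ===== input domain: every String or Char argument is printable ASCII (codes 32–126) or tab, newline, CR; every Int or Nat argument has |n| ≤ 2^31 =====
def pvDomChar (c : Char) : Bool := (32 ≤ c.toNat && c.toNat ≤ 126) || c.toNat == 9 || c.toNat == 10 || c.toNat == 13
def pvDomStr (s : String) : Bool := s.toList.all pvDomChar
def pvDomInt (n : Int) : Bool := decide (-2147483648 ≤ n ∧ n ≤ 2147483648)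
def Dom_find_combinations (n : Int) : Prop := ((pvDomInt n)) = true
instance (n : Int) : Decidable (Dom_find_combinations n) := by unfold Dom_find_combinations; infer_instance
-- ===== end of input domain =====

-- B replaces A's recursive dfs (with closure and range pruning) by four flat nested loops over the
-- full [min_atoms, max_atoms] range with the fifth component computed arithmetically; same output, same order.

-- Shared by both ports: exact integer emulation of the IEEE-754 binary64 products 0.05*n and 0.35*n
-- (round to nearest, ties to even) that Python computes, for 0 ≤ n ≤ 2^31; fl(0.05)=7205759403792794·2⁻⁵⁷,
-- fl(0.35)=6305039478318694·2⁻⁵⁴.  pvFl53 rounds a positive integer to 53 significant bits.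
def pvFl53 (p : Nat) : Nat :=
  if p < 2 ^ 53 then p
  else
    let k := p.log2 - 52
    let q := p / 2 ^ k
    let r := p % 2 ^ k
    let h := 2 ^ (k - 1)
    (if h < r ∨ (r = h ∧ q % 2 = 1) then q + 1 else q) * 2 ^ k

-- min_atoms = max(1, math.ceil(0.05 * n))   (ceil of the rounded float; n ≥ 5 at every use site)
def pvMinAtoms (n : Int) : Int :=
  max 1 (Int.ofNat ((pvFl53 (7205759403792794 * n.toNat) + 2 ^ 57 - 1) / 2 ^ 57))

-- max_atoms = int(0.35 * n)   (truncation = floor, the value is ≥ 0 for n ≥ 5)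
def pvMaxAtoms (n : Int) : Int :=
  Int.ofNat (pvFl53 (6305039478318694 * n.toNat) / 2 ^ 54)

-- ===== PORT A =====
-- dfs: emissions are returned (Python appends them to `combinations` in this exact order).
-- `len(path) == 4` is ported as `4 ≤ path.length` for termination; dfs is only ever called with
-- path.length ≤ 4, where the two tests coincide.  t[k] (k literal, in range) is ported as List.getD.
def pvDfsA (c1 c2 : Int) (remaining : Int) (path : List Int) :
    List (Int × Int × Int × Int × Int) :=
  if 4 ≤ path.length then
    let last := remaining + 1
    if c1 ≤ last ∧ last ≤ c2 then
      let combo := path ++ [remaining]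
      let t := combo.map (· + 1)
      if t.getD 0 0 ≥ t.getD 1 0 ∧ t.getD 0 0 ≥ t.getD 2 0 ∧
         t.getD 0 0 ≥ t.getD 3 0 ∧ t.getD 0 0 ≥ t.getD 4 0 then
        [(t.getD 0 0, t.getD 1 0, t.getD 2 0, t.getD 3 0, t.getD 4 0)]
      else []
    else []
  else
    (PySem.List.pyRange (max 0 (c1 - 1)) (min (remaining + 1) c2) 1).foldl
      (fun acc i =>
        if c1 ≤ i + 1 ∧ i + 1 ≤ c2 then acc ++ pvDfsA c1 c2 (remaining - i) (path ++ [i])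
        else acc) []
termination_by (4 - path.length : Nat)
decreasing_by simp only [List.length_append, List.length_cons, List.length_nil]; omega

def find_combinations (n : Int) : List (Int × Int × Int × Int × Int) :=
  let s := n - 5
  if s < 0 then []
  else
    let min_atoms := pvMinAtoms n
    let max_atoms := pvMaxAtoms n
    pvDfsA min_atoms max_atoms s []

-- ===== PORT B =====
def find_combinations_alt (n : Int) : List (Int × Int × Int × Int × Int) :=
  let s := n - 5
  if s < 0 then []
  else
    let min_atoms := pvMinAtoms n
    let max_atoms := pvMaxAtoms n
    (PySem.List.pyRange min_atoms (max_atoms + 1) 1).foldl (fun acc a1 =>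
      (PySem.List.pyRange min_atoms (max_atoms + 1) 1).foldl (fun acc a2 =>
        (PySem.List.pyRange min_atoms (max_atoms + 1) 1).foldl (fun acc a3 =>
          (PySem.List.pyRange min_atoms (max_atoms + 1) 1).foldl (fun acc a4 =>
            let a5 := n - a1 - a2 - a3 - a4
            if min_atoms ≤ a5 ∧ a5 ≤ max_atoms ∧ a1 ≥ a2 ∧ a1 ≥ a3 ∧ a1 ≥ a4 ∧ a1 ≥ a5 then
              acc ++ [(a1, a2, a3, a4, a5)]
            else acc) acc) acc) acc) []

-- ===== PRECONDITION & SPEC =====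
def Spec_find_combinations (n : Int) (out : List (Int × Int × Int × Int × Int)) : Prop := out = find_combinations_alt n
instance (n : Int) (out : List (Int × Int × Int × Int × Int)) : Decidable (Spec_find_combinations n out) := by unfold Spec_find_combinations; infer_instance

-- ===== CLAIM (what is proved, stated in full; the proofs are below) =====
def Claim_equal_find_combinations : Prop := ∀ (n : Int), Dom_find_combinations n → Spec_find_combinations n (find_combinations n)

-- ===== LEMMAS AND PROOFS =====

-- the leaf emission of A's dfs, as a standalone function
def pvLeaf (c1 c2 rem i1 i2 i3 i4 : Int) : List (Int × Int × Int × Int × Int) :=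
  if c1 ≤ rem + 1 ∧ rem + 1 ≤ c2 then
    if i1 + 1 ≥ i2 + 1 ∧ i1 + 1 ≥ i3 + 1 ∧ i1 + 1 ≥ i4 + 1 ∧ i1 + 1 ≥ rem + 1 then
      [(i1 + 1, i2 + 1, i3 + 1, i4 + 1, rem + 1)]
    else []
  else []

-- A's dfs fully expanded into nested flatMaps over its (pruned) ranges
def pvE4 (c1 c2 rem3 i1 i2 i3 : Int) : List (Int × Int × Int × Int × Int) :=
  (PySem.List.pyRange (c1 - 1) (min (rem3 + 1) c2) 1).flatMap
    (fun i4 => pvLeaf c1 c2 (rem3 - i4) i1 i2 i3 i4)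
def pvE3 (c1 c2 rem2 i1 i2 : Int) : List (Int × Int × Int × Int × Int) :=
  (PySem.List.pyRange (c1 - 1) (min (rem2 + 1) c2) 1).flatMap
    (fun i3 => pvE4 c1 c2 (rem2 - i3) i1 i2 i3)
def pvE2 (c1 c2 rem1 i1 : Int) : List (Int × Int × Int × Int × Int) :=
  (PySem.List.pyRange (c1 - 1) (min (rem1 + 1) c2) 1).flatMap
    (fun i2 => pvE3 c1 c2 (rem1 - i2) i1 i2)
def pvE1 (c1 c2 s : Int) : List (Int × Int × Int × Int × Int) :=
  (PySem.List.pyRange (c1 - 1) (min (s + 1) c2) 1).flatMap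
    (fun i1 => pvE2 c1 c2 (s - i1) i1)

-- B's loops as nested flatMaps over the full range
def pvB4 (c1 c2 n a1 a2 a3 a4 : Int) : List (Int × Int × Int × Int × Int) :=
  let a5 := n - a1 - a2 - a3 - a4
  if c1 ≤ a5 ∧ a5 ≤ c2 ∧ a1 ≥ a2 ∧ a1 ≥ a3 ∧ a1 ≥ a4 ∧ a1 ≥ a5 then [(a1, a2, a3, a4, a5)]
  else []
def pvF4 (c1 c2 n a1 a2 a3 : Int) : List (Int × Int × Int × Int × Int) :=
  (PySem.List.pyRange c1 (c2 + 1) 1).flatMap (fun a4 => pvB4 c1 c2 n a1 a2 a3 a4)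
def pvF3 (c1 c2 n a1 a2 : Int) : List (Int × Int × Int × Int × Int) :=
  (PySem.List.pyRange c1 (c2 + 1) 1).flatMap (fun a3 => pvF4 c1 c2 n a1 a2 a3)
def pvF2 (c1 c2 n a1 : Int) : List (Int × Int × Int × Int × Int) :=
  (PySem.List.pyRange c1 (c2 + 1) 1).flatMap (fun a2 => pvF3 c1 c2 n a1 a2)
def pvF1 (c1 c2 n : Int) : List (Int × Int × Int × Int × Int) :=
  (PySem.List.pyRange c1 (c2 + 1) 1).flatMap (fun a1 => pvF2 c1 c2 n a1)

-- generic helpers -------------------------------------------------------------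

lemma pvShift {α : Type} (lo hi : Int) (f : Int → List α) :
    (PySem.List.pyRange lo hi 1).flatMap f
      = (PySem.List.pyRange (lo + 1) (hi + 1) 1).flatMap (fun a => f (a - 1)) := by
  rw [PySem.List.pyRange_one, PySem.List.pyRange_one, List.flatMap_map, List.flatMap_map]
  have h : hi + 1 - (lo + 1) = hi - lo := by ring
  rw [h]
  congr 1
  funext k
  congr 1
  ring

lemma pvTrunc {α : Type} (lo hi hi' : Int) (f : Int → List α) (h : hi ≤ hi')
    (hz : ∀ a, hi ≤ a → a < hi' → f a = []) :
    (PySem.List.pyRange lo hi' 1).flatMap f = (PySem.List.pyRange lo hi 1).flatMap f := by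
  by_cases hlo : lo ≤ hi
  · rw [PySem.List.pyRange_one_append lo hi hi' hlo h, List.flatMap_append]
    have hnil : (PySem.List.pyRange hi hi' 1).flatMap f = [] := by
      rw [List.flatMap_eq_nil_iff]
      intro a ha
      rw [PySem.List.mem_pyRange_one] at ha
      exact hz a ha.1 ha.2
    rw [hnil, List.append_nil]
  · rw [PySem.List.pyRange_one_eq_nil (by omega : hi ≤ lo), List.flatMap_nil,
      List.flatMap_eq_nil_iff]
    intro a ha
    rw [PySem.List.mem_pyRange_one] at ha
    exact hz a (by omega) ha.2

lemma pvIfFlat {α : Type} (l : List Int) (p : Int → Prop) [DecidablePred p] (f : Int → α)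
    (acc : List α) :
    l.foldl (fun acc x => if p x then acc ++ [f x] else acc) acc
      = acc ++ l.flatMap fun x => if p x then [f x] else [] := by
  induction l generalizing acc with
  | nil => simp
  | cons h t ih =>
    rw [List.foldl_cons, List.flatMap_cons, ih]
    split_ifs <;> simp

-- emptiness lemmas --------------------------------------------------------------

lemma pvB4_nil (c1 c2 n a1 a2 a3 a4 : Int) (_hc1 : 1 ≤ c1) (h : n - a1 - a2 - a3 - a4 < c1) :
    pvB4 c1 c2 n a1 a2 a3 a4 = [] := by
  unfold pvB4
  rw [if_neg]
  intro hcon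
  omega

lemma pvF4_nil (c1 c2 n a1 a2 a3 : Int) (hc1 : 1 ≤ c1) (h : n - a1 - a2 - a3 < 2 * c1) :
    pvF4 c1 c2 n a1 a2 a3 = [] := by
  unfold pvF4
  rw [List.flatMap_eq_nil_iff]
  intro a4 ha
  rw [PySem.List.mem_pyRange_one] at ha
  exact pvB4_nil c1 c2 n a1 a2 a3 a4 hc1 (by omega)

lemma pvF3_nil (c1 c2 n a1 a2 : Int) (hc1 : 1 ≤ c1) (h : n - a1 - a2 < 3 * c1) :
    pvF3 c1 c2 n a1 a2 = [] := by
  unfold pvF3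
  rw [List.flatMap_eq_nil_iff]
  intro a3 ha
  rw [PySem.List.mem_pyRange_one] at ha
  exact pvF4_nil c1 c2 n a1 a2 a3 hc1 (by omega)

lemma pvF2_nil (c1 c2 n a1 : Int) (hc1 : 1 ≤ c1) (h : n - a1 < 4 * c1) :
    pvF2 c1 c2 n a1 = [] := by
  unfold pvF2
  rw [List.flatMap_eq_nil_iff]
  intro a2 ha
  rw [PySem.List.mem_pyRange_one] at ha
  exact pvF3_nil c1 c2 n a1 a2 hc1 (by omega)

-- A's dfs = the E-normal form ---------------------------------------------------

lemma pvDfs_step (c1 c2 rem : Int) (path : List Int) (hlen : path.length < 4) (hc1 : 1 ≤ c1) :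
    pvDfsA c1 c2 rem path
      = (PySem.List.pyRange (c1 - 1) (min (rem + 1) c2) 1).flatMap
          (fun i => pvDfsA c1 c2 (rem - i) (path ++ [i])) := by
  conv_lhs => rw [pvDfsA.eq_def]
  rw [if_neg (by omega)]
  have hm : max 0 (c1 - 1) = c1 - 1 := by omega
  rw [hm]
  have step1 := PySem.List.foldl_congr_mem
    (PySem.List.pyRange (c1 - 1) (min (rem + 1) c2) 1)
    (fun acc i =>
      if c1 ≤ i + 1 ∧ i + 1 ≤ c2 then acc ++ pvDfsA c1 c2 (rem - i) (path ++ [i]) else acc)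
    (fun acc i => acc ++ pvDfsA c1 c2 (rem - i) (path ++ [i])) []
    (fun acc i hi => by
      rw [PySem.List.mem_pyRange_one] at hi
      exact if_pos ⟨by omega, by omega⟩)
  rw [step1]
  simpa using PySem.List.foldl_append_eq_flatMap
    (fun i => pvDfsA c1 c2 (rem - i) (path ++ [i]))
    (PySem.List.pyRange (c1 - 1) (min (rem + 1) c2) 1) []

lemma pvDfs_leaf (c1 c2 rem i1 i2 i3 i4 : Int) :
    pvDfsA c1 c2 rem [i1, i2, i3, i4] = pvLeaf c1 c2 rem i1 i2 i3 i4 := by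
  rw [pvDfsA.eq_def]
  simp [pvLeaf, List.getD]

lemma pvA3 (c1 c2 rem i1 i2 i3 : Int) (hc1 : 1 ≤ c1) :
    pvDfsA c1 c2 rem [i1, i2, i3] = pvE4 c1 c2 rem i1 i2 i3 := by
  rw [pvDfs_step c1 c2 rem [i1, i2, i3] (by simp) hc1]
  unfold pvE4
  congr 1
  funext i4
  simpa using pvDfs_leaf c1 c2 (rem - i4) i1 i2 i3 i4

lemma pvA2 (c1 c2 rem i1 i2 : Int) (hc1 : 1 ≤ c1) :
    pvDfsA c1 c2 rem [i1, i2] = pvE3 c1 c2 rem i1 i2 := by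
  rw [pvDfs_step c1 c2 rem [i1, i2] (by simp) hc1]
  unfold pvE3
  congr 1
  funext i3
  simpa using pvA3 c1 c2 (rem - i3) i1 i2 i3 hc1

lemma pvA1 (c1 c2 rem i1 : Int) (hc1 : 1 ≤ c1) :
    pvDfsA c1 c2 rem [i1] = pvE2 c1 c2 rem i1 := by
  rw [pvDfs_step c1 c2 rem [i1] (by simp) hc1]
  unfold pvE2
  congr 1
  funext i2
  simpa using pvA2 c1 c2 (rem - i2) i1 i2 hc1

lemma pvA0 (c1 c2 s : Int) (hc1 : 1 ≤ c1) :
    pvDfsA c1 c2 s [] = pvE1 c1 c2 s := by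
  rw [pvDfs_step c1 c2 s [] (by simp) hc1]
  unfold pvE1
  congr 1
  funext i1
  simpa using pvA1 c1 c2 (s - i1) i1 hc1

-- E-normal form = F-normal form (shift by one, then extend the pruned ranges) ----

lemma pvE4F (c1 c2 n rem3 i1 i2 i3 : Int) (hc1 : 1 ≤ c1) (h : rem3 = n - 5 - i1 - i2 - i3) :
    pvE4 c1 c2 rem3 i1 i2 i3 = pvF4 c1 c2 n (i1 + 1) (i2 + 1) (i3 + 1) := by
  unfold pvE4
  have hfun : (fun i4 => pvLeaf c1 c2 (rem3 - i4) i1 i2 i3 i4)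
      = fun i4 => pvB4 c1 c2 n (i1 + 1) (i2 + 1) (i3 + 1) (i4 + 1) := by
    funext i4
    simp only [pvLeaf, pvB4]
    have e : n - (i1 + 1) - (i2 + 1) - (i3 + 1) - (i4 + 1) = rem3 - i4 + 1 := by omega
    rw [e]
    split_ifs <;> first | rfl | omega
  rw [hfun, pvShift]
  have e1 : c1 - 1 + 1 = c1 := by ring
  have e2 : min (rem3 + 1) c2 + 1 = min (rem3 + 2) (c2 + 1) := by omega
  rw [e1, e2]
  have hfun2 : (fun a => pvB4 c1 c2 n (i1 + 1) (i2 + 1) (i3 + 1) (a - 1 + 1))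
      = fun a4 => pvB4 c1 c2 n (i1 + 1) (i2 + 1) (i3 + 1) a4 := by
    funext a
    congr 1
    ring
  rw [hfun2]
  exact (pvTrunc c1 (min (rem3 + 2) (c2 + 1)) (c2 + 1) _ (by omega)
    (fun a ha ha' => pvB4_nil c1 c2 n (i1 + 1) (i2 + 1) (i3 + 1) a hc1 (by omega))).symm

lemma pvE3F (c1 c2 n rem2 i1 i2 : Int) (hc1 : 1 ≤ c1) (h : rem2 = n - 5 - i1 - i2) :
    pvE3 c1 c2 rem2 i1 i2 = pvF3 c1 c2 n (i1 + 1) (i2 + 1) := by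
  unfold pvE3
  have hfun : (fun i3 => pvE4 c1 c2 (rem2 - i3) i1 i2 i3)
      = fun i3 => pvF4 c1 c2 n (i1 + 1) (i2 + 1) (i3 + 1) :=
    funext fun i3 => pvE4F c1 c2 n (rem2 - i3) i1 i2 i3 hc1 (by omega)
  rw [hfun, pvShift]
  have e1 : c1 - 1 + 1 = c1 := by ring
  have e2 : min (rem2 + 1) c2 + 1 = min (rem2 + 2) (c2 + 1) := by omega
  rw [e1, e2]
  have hfun2 : (fun a => pvF4 c1 c2 n (i1 + 1) (i2 + 1) (a - 1 + 1))
      = fun a3 => pvF4 c1 c2 n (i1 + 1) (i2 + 1) a3 := by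
    funext a
    congr 1
    ring
  rw [hfun2]
  exact (pvTrunc c1 (min (rem2 + 2) (c2 + 1)) (c2 + 1) _ (by omega)
    (fun a ha ha' => pvF4_nil c1 c2 n (i1 + 1) (i2 + 1) a hc1 (by omega))).symm

lemma pvE2F (c1 c2 n rem1 i1 : Int) (hc1 : 1 ≤ c1) (h : rem1 = n - 5 - i1) :
    pvE2 c1 c2 rem1 i1 = pvF2 c1 c2 n (i1 + 1) := by
  unfold pvE2
  have hfun : (fun i2 => pvE3 c1 c2 (rem1 - i2) i1 i2)
      = fun i2 => pvF3 c1 c2 n (i1 + 1) (i2 + 1) :=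
    funext fun i2 => pvE3F c1 c2 n (rem1 - i2) i1 i2 hc1 (by omega)
  rw [hfun, pvShift]
  have e1 : c1 - 1 + 1 = c1 := by ring
  have e2 : min (rem1 + 1) c2 + 1 = min (rem1 + 2) (c2 + 1) := by omega
  rw [e1, e2]
  have hfun2 : (fun a => pvF3 c1 c2 n (i1 + 1) (a - 1 + 1))
      = fun a2 => pvF3 c1 c2 n (i1 + 1) a2 := by
    funext a
    congr 1
    ring
  rw [hfun2]
  exact (pvTrunc c1 (min (rem1 + 2) (c2 + 1)) (c2 + 1) _ (by omega)
    (fun a ha ha' => pvF3_nil c1 c2 n (i1 + 1) a hc1 (by omega))).symm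

lemma pvE1F (c1 c2 n : Int) (hc1 : 1 ≤ c1) :
    pvE1 c1 c2 (n - 5) = pvF1 c1 c2 n := by
  unfold pvE1
  have hfun : (fun i1 => pvE2 c1 c2 (n - 5 - i1) i1) = fun i1 => pvF2 c1 c2 n (i1 + 1) :=
    funext fun i1 => pvE2F c1 c2 n (n - 5 - i1) i1 hc1 (by omega)
  rw [hfun, pvShift]
  have e1 : c1 - 1 + 1 = c1 := by ring
  have e2 : min (n - 5 + 1) c2 + 1 = min (n - 5 + 2) (c2 + 1) := by omega
  rw [e1, e2]
  have hfun2 : (fun a => pvF2 c1 c2 n (a - 1 + 1)) = fun a1 => pvF2 c1 c2 n a1 := by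
    funext a
    congr 1
    ring
  rw [hfun2]
  exact (pvTrunc c1 (min (n - 5 + 2) (c2 + 1)) (c2 + 1) _ (by omega)
    (fun a ha ha' => pvF2_nil c1 c2 n a hc1 (by omega))).symm

-- B's loops = the F-normal form --------------------------------------------------

lemma pvB4fold (c1 c2 n a1 a2 a3 : Int) (acc : List (Int × Int × Int × Int × Int)) :
    (PySem.List.pyRange c1 (c2 + 1) 1).foldl
        (fun acc a4 =>
          let a5 := n - a1 - a2 - a3 - a4
          if c1 ≤ a5 ∧ a5 ≤ c2 ∧ a1 ≥ a2 ∧ a1 ≥ a3 ∧ a1 ≥ a4 ∧ a1 ≥ a5 then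
            acc ++ [(a1, a2, a3, a4, a5)]
          else acc) acc
      = acc ++ pvF4 c1 c2 n a1 a2 a3 := by
  unfold pvF4
  exact pvIfFlat (PySem.List.pyRange c1 (c2 + 1) 1)
    (fun a4 => c1 ≤ n - a1 - a2 - a3 - a4 ∧ n - a1 - a2 - a3 - a4 ≤ c2 ∧ a1 ≥ a2 ∧ a1 ≥ a3 ∧
      a1 ≥ a4 ∧ a1 ≥ n - a1 - a2 - a3 - a4)
    (fun a4 => (a1, a2, a3, a4, n - a1 - a2 - a3 - a4)) acc

lemma pvB3fold (c1 c2 n a1 a2 : Int) (acc : List (Int × Int × Int × Int × Int)) :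
    (PySem.List.pyRange c1 (c2 + 1) 1).foldl
        (fun acc a3 =>
          (PySem.List.pyRange c1 (c2 + 1) 1).foldl
            (fun acc a4 =>
              let a5 := n - a1 - a2 - a3 - a4
              if c1 ≤ a5 ∧ a5 ≤ c2 ∧ a1 ≥ a2 ∧ a1 ≥ a3 ∧ a1 ≥ a4 ∧ a1 ≥ a5 then
                acc ++ [(a1, a2, a3, a4, a5)]
              else acc) acc) acc
      = acc ++ pvF3 c1 c2 n a1 a2 := by
  have hfun : (fun acc a3 =>
        (PySem.List.pyRange c1 (c2 + 1) 1).foldl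
          (fun acc a4 =>
            let a5 := n - a1 - a2 - a3 - a4
            if c1 ≤ a5 ∧ a5 ≤ c2 ∧ a1 ≥ a2 ∧ a1 ≥ a3 ∧ a1 ≥ a4 ∧ a1 ≥ a5 then
              acc ++ [(a1, a2, a3, a4, a5)]
            else acc) acc)
      = fun (acc : List (Int × Int × Int × Int × Int)) a3 => acc ++ pvF4 c1 c2 n a1 a2 a3 := by
    funext acc a3
    exact pvB4fold c1 c2 n a1 a2 a3 acc
  rw [hfun]
  unfold pvF3
  exact PySem.List.foldl_append_eq_flatMap _ _ acc

lemma pvB2fold (c1 c2 n a1 : Int) (acc : List (Int × Int × Int × Int × Int)) :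
    (PySem.List.pyRange c1 (c2 + 1) 1).foldl
        (fun acc a2 =>
          (PySem.List.pyRange c1 (c2 + 1) 1).foldl
            (fun acc a3 =>
              (PySem.List.pyRange c1 (c2 + 1) 1).foldl
                (fun acc a4 =>
                  let a5 := n - a1 - a2 - a3 - a4
                  if c1 ≤ a5 ∧ a5 ≤ c2 ∧ a1 ≥ a2 ∧ a1 ≥ a3 ∧ a1 ≥ a4 ∧ a1 ≥ a5 then
                    acc ++ [(a1, a2, a3, a4, a5)]
                  else acc) acc) acc) acc
      = acc ++ pvF2 c1 c2 n a1 := by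
  have hfun : (fun (acc : List (Int × Int × Int × Int × Int)) a2 =>
        (PySem.List.pyRange c1 (c2 + 1) 1).foldl
          (fun acc a3 =>
            (PySem.List.pyRange c1 (c2 + 1) 1).foldl
              (fun acc a4 =>
                let a5 := n - a1 - a2 - a3 - a4
                if c1 ≤ a5 ∧ a5 ≤ c2 ∧ a1 ≥ a2 ∧ a1 ≥ a3 ∧ a1 ≥ a4 ∧ a1 ≥ a5 then
                  acc ++ [(a1, a2, a3, a4, a5)]
                else acc) acc) acc)
      = fun (acc : List (Int × Int × Int × Int × Int)) a2 => acc ++ pvF3 c1 c2 n a1 a2 := by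
    funext acc a2
    exact pvB3fold c1 c2 n a1 a2 acc
  rw [hfun]
  unfold pvF2
  exact PySem.List.foldl_append_eq_flatMap _ _ acc

lemma pvB1fold (c1 c2 n : Int) :
    (PySem.List.pyRange c1 (c2 + 1) 1).foldl
        (fun acc a1 =>
          (PySem.List.pyRange c1 (c2 + 1) 1).foldl
            (fun acc a2 =>
              (PySem.List.pyRange c1 (c2 + 1) 1).foldl
                (fun acc a3 =>
                  (PySem.List.pyRange c1 (c2 + 1) 1).foldl
                    (fun acc a4 =>
                      let a5 := n - a1 - a2 - a3 - a4
                      if c1 ≤ a5 ∧ a5 ≤ c2 ∧ a1 ≥ a2 ∧ a1 ≥ a3 ∧ a1 ≥ a4 ∧ a1 ≥ a5 then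
                        acc ++ [(a1, a2, a3, a4, a5)]
                      else acc) acc) acc) acc) []
      = pvF1 c1 c2 n := by
  have hfun : (fun (acc : List (Int × Int × Int × Int × Int)) a1 =>
        (PySem.List.pyRange c1 (c2 + 1) 1).foldl
          (fun acc a2 =>
            (PySem.List.pyRange c1 (c2 + 1) 1).foldl
              (fun acc a3 =>
                (PySem.List.pyRange c1 (c2 + 1) 1).foldl
                  (fun acc a4 =>
                    let a5 := n - a1 - a2 - a3 - a4
                    if c1 ≤ a5 ∧ a5 ≤ c2 ∧ a1 ≥ a2 ∧ a1 ≥ a3 ∧ a1 ≥ a4 ∧ a1 ≥ a5 then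
                      acc ++ [(a1, a2, a3, a4, a5)]
                    else acc) acc) acc) acc)
      = fun (acc : List (Int × Int × Int × Int × Int)) a1 => acc ++ pvF2 c1 c2 n a1 := by
    funext acc a1
    exact pvB2fold c1 c2 n a1 acc
  rw [hfun]
  unfold pvF1
  simpa using PySem.List.foldl_append_eq_flatMap
    (fun a1 => pvF2 c1 c2 n a1) (PySem.List.pyRange c1 (c2 + 1) 1) []

lemma pvAform (n : Int) :
    find_combinations n
      = if n - 5 < 0 then [] else pvDfsA (pvMinAtoms n) (pvMaxAtoms n) (n - 5) [] := rfl

lemma pvBform (n : Int) :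
    find_combinations_alt n
      = if n - 5 < 0 then [] else
          (PySem.List.pyRange (pvMinAtoms n) (pvMaxAtoms n + 1) 1).foldl
            (fun acc a1 =>
              (PySem.List.pyRange (pvMinAtoms n) (pvMaxAtoms n + 1) 1).foldl
                (fun acc a2 =>
                  (PySem.List.pyRange (pvMinAtoms n) (pvMaxAtoms n + 1) 1).foldl
                    (fun acc a3 =>
                      (PySem.List.pyRange (pvMinAtoms n) (pvMaxAtoms n + 1) 1).foldl
                        (fun acc a4 =>
                          let a5 := n - a1 - a2 - a3 - a4
                          if pvMinAtoms n ≤ a5 ∧ a5 ≤ pvMaxAtoms n ∧ a1 ≥ a2 ∧ a1 ≥ a3 ∧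
                              a1 ≥ a4 ∧ a1 ≥ a5 then
                            acc ++ [(a1, a2, a3, a4, a5)]
                          else acc) acc) acc) acc) [] := rfl

-- ===== VERDICT (by name: the statement is the Claim_ definition above) =====
theorem find_combinations_spec : Claim_equal_find_combinations := by
  intro n _
  unfold Spec_find_combinations
  rw [pvAform, pvBform]
  by_cases h5 : n - 5 < 0
  · rw [if_pos h5, if_pos h5]
  · have hc1 : 1 ≤ pvMinAtoms n := le_max_left 1 _
    rw [if_neg h5, if_neg h5, pvA0 _ _ _ hc1, pvE1F _ _ _ hc1, pvB1fold]
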